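-- pv_equiv track=rewrite | github.com/Astromsoc/super-rookie-rookie | trivials/ctc_trellis.py | get_trellis
-- ===== SOURCE A (Python) =====
-- def get_trellis(labels, num_frames):
--     trellis = list()
--
--     # first scan: check what can be passed
--     nexts = dict()
--     for i, l in enumerate(labels):
--         nexts[i] = [i]
--         if i < len(labels) - 1:
--             nexts[i].append(i + 1)
--             if labels[i + 1] == '<b>':
--                 if i < len(labels) - 2:
--                     if labels[i + 2] != l:
--                         nexts[i].append(i + 2)
--
--     def unit_add(i, prefix):
--         if len(prefix) >= num_frames:
--             return
--         if len(prefix) == num_frames - 1: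
--             if i >= len(labels) - 2:
--                 trellis.append(prefix + [labels[i]])
--         else:
--             for j in nexts[i]:
--                 unit_add(j, prefix + [labels[i]])
--
--     # start from <b>
--     unit_add(0, [])
--     # start from first char
--     unit_add(1, [])
--
--     return trellis
-- ===== SOURCE B (Python) =====
-- def get_trellis(labels, num_frames):
--     n = len(labels)
--
--     # first scan (same successor table as the original)
--     nexts = dict()
--     for i, l in enumerate(labels):
--         nexts[i] = [i]
--         if i < n - 1:
--             nexts[i].append(i + 1)
--             if labels[i + 1] == '<b>':
--                 if i < n - 2:
--                     if labels[i + 2] != l: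
--                         nexts[i].append(i + 2)
--
--     if num_frames <= 0:
--         return []
--
--     # breadth-first, level-synchronous expansion of the two start states;
--     # all complete paths have the same length, so the final frontier order
--     # coincides with the depth-first emission order of the original.
--     frontier = [(0, []), (1, [])]
--     for _ in range(num_frames - 1):
--         frontier = [(j, pre + [labels[i]]) for (i, pre) in frontier for j in nexts[i]]
--     return [pre + [labels[i]] for (i, pre) in frontier if i >= n - 2]
-- ===== Notes on version B (the rewrite author's own statement) =====
-- stated objective: alternative
-- what changed: Replaces the recursive depth-first unit_add (closure mutating a shared trellis) by a level-synchronous frontier loop that expands all partial paths one frame per iteration and filters the final frontier; since every emitted path has exactly num_frames labels, the frontier order equals the DFS emission order.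
-- outside the precondition, e.g. on get_trellis(['a'], 2): A raises KeyError, B raises KeyError; on get_trellis([], 1): A raises IndexError, B raises IndexError
import Mathlib
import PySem

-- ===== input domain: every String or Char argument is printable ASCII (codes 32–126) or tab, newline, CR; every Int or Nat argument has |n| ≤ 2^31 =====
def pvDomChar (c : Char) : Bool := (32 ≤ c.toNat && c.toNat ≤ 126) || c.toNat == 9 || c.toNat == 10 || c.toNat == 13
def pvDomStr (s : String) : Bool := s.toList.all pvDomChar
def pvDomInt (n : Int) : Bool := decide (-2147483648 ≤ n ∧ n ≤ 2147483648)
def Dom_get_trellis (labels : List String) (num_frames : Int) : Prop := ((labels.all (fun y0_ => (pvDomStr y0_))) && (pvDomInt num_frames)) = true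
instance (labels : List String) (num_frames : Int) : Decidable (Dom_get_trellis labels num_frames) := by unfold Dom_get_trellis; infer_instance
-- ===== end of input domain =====

-- B replaces A's recursive depth-first `unit_add` by a level-synchronous frontier
-- loop (same successor table); objective: alternative decomposition, same cost.

-- ===== PORT A =====
-- first scan: nexts[i] = [i] (+ i+1, + possibly i+2)
def buildNexts (labels : List String) : PySem.Dict Int (List Int) :=
  (PySem.List.enumerate labels).foldl (fun d il =>
    let i : Int := il.1
    let l : String := il.2
    let d := d.insert i [i]
    if i < (labels.length : Int) - 1 then
      let d := d.modify i [] (fun ns => ns ++ [i + 1])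
      if (PySem.List.pyGet? labels (i + 1)).getD "" = "<b>" then
        if i < (labels.length : Int) - 2 then
          if (PySem.List.pyGet? labels (i + 2)).getD "" ≠ l then
            d.modify i [] (fun ns => ns ++ [i + 2])
          else d
        else d
      else d
    else d) PySem.Dict.empty

-- the recursive unit_add; trellis threaded through; the inner `for j in nexts[i]`
-- is the mutually recursive unitAddFold.  (Dict/list lookups that raise in Python
-- are outside Pre_get_trellis; the port uses a default there.)
mutual
def unitAdd (labels : List String) (nexts : PySem.Dict Int (List Int)) (num_frames : Int)
    (i : Int) (pre : List String) (trellis : List (List String)) : List (List String) :=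
  if (pre.length : Int) ≥ num_frames then trellis
  else if (pre.length : Int) = num_frames - 1 then
    if i ≥ (labels.length : Int) - 2 then
      trellis ++ [pre ++ [(PySem.List.pyGet? labels i).getD ""]]
    else trellis
  else
    unitAddFold labels nexts num_frames (nexts.getD i [])
      (pre ++ [(PySem.List.pyGet? labels i).getD ""]) trellis
termination_by ((num_frames - pre.length).toNat, 0)
decreasing_by
  apply Prod.Lex.left; simp only [List.length_append, List.length_cons]; omega

def unitAddFold (labels : List String) (nexts : PySem.Dict Int (List Int)) (num_frames : Int)
    (js : List Int) (pre : List String) (trellis : List (List String)) : List (List String) :=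
  match js with
  | [] => trellis
  | j :: rest =>
      unitAddFold labels nexts num_frames rest pre
        (unitAdd labels nexts num_frames j pre trellis)
termination_by ((num_frames - pre.length).toNat, js.length + 1)
decreasing_by
  · apply Prod.Lex.right; simp only [List.length_cons]; omega
  · apply Prod.Lex.right; simp only [List.length_cons]; omega
end

def get_trellis (labels : List String) (num_frames : Int) : List (List String) :=
  let nexts := buildNexts labels
  let trellis : List (List String) := []
  let trellis := unitAdd labels nexts num_frames 0 [] trellis
  let trellis := unitAdd labels nexts num_frames 1 [] trellis
  trellis

-- ===== PORT B =====
def stepFrontier (labels : List String) (nexts : PySem.Dict Int (List Int))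
    (frontier : List (Int × List String)) : List (Int × List String) :=
  frontier.flatMap (fun ip =>
    (nexts.getD ip.1 []).map (fun j => (j, ip.2 ++ [(PySem.List.pyGet? labels ip.1).getD ""])))

def iterFrontier (labels : List String) (nexts : PySem.Dict Int (List Int)) :
    Nat → List (Int × List String) → List (Int × List String)
  | 0, f => f
  | k + 1, f => iterFrontier labels nexts k (stepFrontier labels nexts f)

def get_trellis_alt (labels : List String) (num_frames : Int) : List (List String) :=
  let nexts := buildNexts labels
  if num_frames ≤ 0 then []
  else
    (iterFrontier labels nexts (num_frames - 1).toNat [(0, []), (1, [])]).filterMap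
      (fun ip => if ip.1 ≥ (labels.length : Int) - 2 then
        some (ip.2 ++ [(PySem.List.pyGet? labels ip.1).getD ""]) else none)

-- ===== PRECONDITION & SPEC =====
-- Pre_ excludes exactly the inputs on which Python A raises (KeyError nexts[1] /
-- IndexError labels[i]): num_frames ≥ 1 with fewer than two labels.
def Pre_get_trellis (labels : List String) (num_frames : Int) : Prop :=
  num_frames ≤ 0 ∨ 2 ≤ labels.length
instance (labels : List String) (num_frames : Int) : Decidable (Pre_get_trellis labels num_frames) := by unfold Pre_get_trellis; infer_instance

def pvWitness_get_trellis : List String × Int := (["<b>", "a", "<b>", "b"], 5)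

def Spec_get_trellis (labels : List String) (num_frames : Int) (out : List (List String)) : Prop := out = get_trellis_alt labels num_frames
instance (labels : List String) (num_frames : Int) (out : List (List String)) : Decidable (Spec_get_trellis labels num_frames out) := by unfold Spec_get_trellis; infer_instance

-- ===== CLAIM (what is proved, stated in full; the proofs are below) =====
def Claim_equal_get_trellis : Prop := ∀ (labels : List String) (num_frames : Int), Dom_get_trellis labels num_frames → Pre_get_trellis labels num_frames → Spec_get_trellis labels num_frames (get_trellis labels num_frames)

-- ===== LEMMAS AND PROOFS =====

-- fold A's unit_add over a whole frontier
def dfsFold (labels : List String) (nexts : PySem.Dict Int (List Int)) (num_frames : Int)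
    (F : List (Int × List String)) (tr : List (List String)) : List (List String) :=
  F.foldl (fun t ip => unitAdd labels nexts num_frames ip.1 ip.2 t) tr

def finalize (labels : List String) (F : List (Int × List String)) : List (List String) :=
  F.filterMap (fun ip => if ip.1 ≥ (labels.length : Int) - 2 then
    some (ip.2 ++ [(PySem.List.pyGet? labels ip.1).getD ""]) else none)

lemma unitAddFold_eq_dfsFold (labels : List String) (nexts : PySem.Dict Int (List Int))
    (num_frames : Int) (js : List Int) (pre : List String) (tr : List (List String)) :
    unitAddFold labels nexts num_frames js pre tr
      = dfsFold labels nexts num_frames (js.map (fun j => (j, pre))) tr := by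
  induction js generalizing tr with
  | nil => simp [unitAddFold, dfsFold]
  | cons j rest ih =>
    rw [unitAddFold, ih]
    rfl

lemma dfsFold_append (labels : List String) (nexts : PySem.Dict Int (List Int))
    (num_frames : Int) (F G : List (Int × List String)) (tr : List (List String)) :
    dfsFold labels nexts num_frames (F ++ G) tr
      = dfsFold labels nexts num_frames G (dfsFold labels nexts num_frames F tr) := by
  simp [dfsFold, List.foldl_append]

-- level-synchronous invariant: if every prefix on the frontier has length
-- num_frames - 1 - k, the DFS fold over the frontier appends exactly the
-- completions of k further expansion rounds.
lemma dfsFold_eq_finalize (labels : List String) (nexts : PySem.Dict Int (List Int))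
    (num_frames : Int) (k : Nat) :
    ∀ (F : List (Int × List String)) (tr : List (List String)),
      (∀ ip ∈ F, (ip.2.length : Int) = num_frames - 1 - k) →
      dfsFold labels nexts num_frames F tr
        = tr ++ finalize labels (iterFrontier labels nexts k F) := by
  induction k with
  | zero =>
    intro F tr hF
    induction F generalizing tr with
    | nil => simp [dfsFold, finalize, iterFrontier]
    | cons ip F' ih =>
      have hlen : (ip.2.length : Int) = num_frames - 1 := by
        have := hF ip (by simp); push_cast at this ⊢; omega
      have hrest : ∀ q ∈ F', (q.2.length : Int) = num_frames - 1 - (0 : Nat) := by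
        intro q hq; exact hF q (by simp [hq])
      have hcons : dfsFold labels nexts num_frames (ip :: F') tr
          = dfsFold labels nexts num_frames F' (unitAdd labels nexts num_frames ip.1 ip.2 tr) := rfl
      have hu : unitAdd labels nexts num_frames ip.1 ip.2 tr
          = tr ++ (if ip.1 ≥ (labels.length : Int) - 2 then
              [ip.2 ++ [(PySem.List.pyGet? labels ip.1).getD ""]] else []) := by
        rw [unitAdd, if_neg (by omega), if_pos hlen]
        split_ifs <;> simp
      rw [hcons, ih _ hrest, hu]
      show (tr ++ _) ++ finalize labels F' = tr ++ finalize labels (ip :: F')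
      simp only [finalize, List.filterMap_cons]
      split_ifs <;> simp
  | succ k ih =>
    intro F tr hF
    have hstep : ∀ (F : List (Int × List String)) (tr : List (List String)),
        (∀ ip ∈ F, (ip.2.length : Int) = num_frames - 1 - ((k : Int) + 1)) →
        dfsFold labels nexts num_frames F tr
          = dfsFold labels nexts num_frames (stepFrontier labels nexts F) tr := by
      intro F
      induction F with
      | nil => intro tr _; rfl
      | cons ip F' ihF =>
        intro tr hF'
        have hlen : (ip.2.length : Int) = num_frames - 1 - ((k : Int) + 1) := hF' ip (by simp)
        have hrest : ∀ q ∈ F', (q.2.length : Int) = num_frames - 1 - ((k : Int) + 1) := by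
          intro q hq; exact hF' q (by simp [hq])
        have hcons : dfsFold labels nexts num_frames (ip :: F') tr
            = dfsFold labels nexts num_frames F' (unitAdd labels nexts num_frames ip.1 ip.2 tr) := rfl
        have hu : unitAdd labels nexts num_frames ip.1 ip.2 tr
            = dfsFold labels nexts num_frames
                ((nexts.getD ip.1 []).map
                  (fun j => (j, ip.2 ++ [(PySem.List.pyGet? labels ip.1).getD ""]))) tr := by
          rw [unitAdd, if_neg (by omega), if_neg (by omega), unitAddFold_eq_dfsFold]
        have hsplit : stepFrontier labels nexts (ip :: F')
            = ((nexts.getD ip.1 []).map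
                (fun j => (j, ip.2 ++ [(PySem.List.pyGet? labels ip.1).getD ""])))
              ++ stepFrontier labels nexts F' := by
          simp [stepFrontier]
        rw [hcons, hu, ihF _ hrest, hsplit, dfsFold_append]
    have hF' : ∀ ip ∈ F, (ip.2.length : Int) = num_frames - 1 - ((k : Int) + 1) := by
      intro ip hip; have := hF ip hip; push_cast at this ⊢; omega
    rw [hstep F tr hF']
    have hnew : ∀ ip ∈ stepFrontier labels nexts F, (ip.2.length : Int) = num_frames - 1 - k := by
      intro ip hip
      simp only [stepFrontier, List.mem_flatMap, List.mem_map] at hip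
      obtain ⟨q, hq, j, _, rfl⟩ := hip
      have := hF' q hq
      simp only [List.length_append, List.length_cons, List.length_nil]
      push_cast at this ⊢; omega
    rw [ih _ tr hnew]
    rfl

lemma unitAdd_stop (labels : List String) (nexts : PySem.Dict Int (List Int))
    (num_frames : Int) (i : Int) (tr : List (List String)) (h : num_frames ≤ 0) :
    unitAdd labels nexts num_frames i [] tr = tr := by
  rw [unitAdd, if_pos (by simp; omega)]

-- ===== VERDICT (by name: the statement is the Claim_ definition above) =====
theorem get_trellis_spec : Claim_equal_get_trellis := by
  intro labels num_frames _ _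
  unfold Spec_get_trellis get_trellis get_trellis_alt
  by_cases h : num_frames ≤ 0
  · rw [if_pos h]
    show unitAdd labels (buildNexts labels) num_frames 1 []
        (unitAdd labels (buildNexts labels) num_frames 0 [] []) = []
    rw [unitAdd_stop _ _ _ _ _ h, unitAdd_stop _ _ _ _ _ h]
  · rw [if_neg h]
    have hstart : ∀ ip ∈ ([((0 : Int), ([] : List String)), (1, [])] :
        List (Int × List String)),
        (ip.2.length : Int) = num_frames - 1 - ((num_frames - 1).toNat : Int) := by
      intro ip hip
      have : ip = ((0 : Int), ([] : List String)) ∨ ip = (1, []) := by simpa using hip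
      rcases this with rfl | rfl <;> simp <;> omega
    have hmain := dfsFold_eq_finalize labels (buildNexts labels) num_frames
      (num_frames - 1).toNat [((0 : Int), ([] : List String)), (1, [])] [] hstart
    have e : dfsFold labels (buildNexts labels) num_frames
        [((0 : Int), ([] : List String)), (1, [])] []
        = unitAdd labels (buildNexts labels) num_frames 1 []
            (unitAdd labels (buildNexts labels) num_frames 0 [] []) := rfl
    rw [e] at hmain
    show unitAdd labels (buildNexts labels) num_frames 1 []
        (unitAdd labels (buildNexts labels) num_frames 0 [] []) = _
    rw [hmain]
    simp [finalize]
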